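-- pv_equiv track=rewrite | github.com/kcarter80/2020-advent-of-code | day-17/part-1.py | blank_rectangular_prism
-- ===== SOURCE A (Python) =====
-- from collections import OrderedDict
--
-- def blank_rectangular_prism(state):
-- 	blank_rectangular_prism = OrderedDict()
-- 	for z in state.keys():
-- 		blank_rectangular_prism[z] = OrderedDict()
-- 		for y in state[z].keys():
-- 			blank_rectangular_prism[z][y] = OrderedDict()
-- 			for x in state[z][y].keys():
-- 				blank_rectangular_prism[z][y][x] = '.'
-- 	return blank_rectangular_prism
-- ===== SOURCE B (Python) =====
-- from collections import OrderedDict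
--
-- def blank_rectangular_prism(state):
--     def build(node, depth):
--         if depth == 0:
--             return '.'
--         return OrderedDict((k, build(v, depth - 1)) for k, v in node.items())
--     return build(state, 3)
-- ===== Notes on version B (the rewrite author's own statement) =====
-- stated objective: simpler
-- what changed: Replaces the three explicit nested dict-building loops with a single depth-indexed recursive helper that rebuilds the nested-dict tree, putting '.' at depth 0.
import Mathlib
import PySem

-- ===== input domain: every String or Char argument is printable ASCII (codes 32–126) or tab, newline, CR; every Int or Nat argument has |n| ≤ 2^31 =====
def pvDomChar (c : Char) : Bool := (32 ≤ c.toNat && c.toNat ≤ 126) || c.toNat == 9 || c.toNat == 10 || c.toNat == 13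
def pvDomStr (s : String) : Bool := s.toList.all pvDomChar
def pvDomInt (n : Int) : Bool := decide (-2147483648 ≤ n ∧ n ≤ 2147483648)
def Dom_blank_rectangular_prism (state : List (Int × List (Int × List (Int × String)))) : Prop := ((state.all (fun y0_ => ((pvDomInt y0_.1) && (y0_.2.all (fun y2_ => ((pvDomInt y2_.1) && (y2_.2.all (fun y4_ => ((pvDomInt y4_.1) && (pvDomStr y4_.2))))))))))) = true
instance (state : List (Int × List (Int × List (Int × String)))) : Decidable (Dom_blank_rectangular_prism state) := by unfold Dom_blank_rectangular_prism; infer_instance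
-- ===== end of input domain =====

-- B replaces A's three explicit dict-building loops by one depth-indexed recursive
-- helper over the nested-dict tree (objective: simpler).

-- ===== PORT A =====
-- literal port of A's three nested loops: iterate keys, look the value up, insert
def blank_rectangular_prism (state : List (Int × List (Int × List (Int × String)))) : List (Int × List (Int × List (Int × String))) :=
  let sd : PySem.Dict Int (List (Int × List (Int × String))) := PySem.Dict.mk state
  let res := sd.keys.foldl (init := (PySem.Dict.empty : PySem.Dict Int (List (Int × List (Int × String))))) fun b z =>
    let zd : PySem.Dict Int (List (Int × String)) := PySem.Dict.mk (sd.getD z [])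
    let inner := zd.keys.foldl (init := (PySem.Dict.empty : PySem.Dict Int (List (Int × String)))) fun b2 y =>
      let yd : PySem.Dict Int String := PySem.Dict.mk (zd.getD y [])
      let inner2 := yd.keys.foldl (init := (PySem.Dict.empty : PySem.Dict Int String)) fun b3 x =>
        b3.insert x "."
      b2.insert y inner2.items
    b.insert z inner.items
  res.items

-- ===== PORT B =====
-- B's recursive build(node, depth) monomorphised by depth (the type changes per level)
def pvBuild1 (node : List (Int × String)) : List (Int × String) :=
  node.map (fun kv => (kv.1, "."))
def pvBuild2 (node : List (Int × List (Int × String))) : List (Int × List (Int × String)) :=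
  node.map (fun kv => (kv.1, pvBuild1 kv.2))
def blank_rectangular_prism_alt (state : List (Int × List (Int × List (Int × String)))) : List (Int × List (Int × List (Int × String))) :=
  state.map (fun kv => (kv.1, pvBuild2 kv.2))

-- ===== PRECONDITION & SPEC =====
-- Pre_ requires distinct keys at every level: the Python argument is a (nested) dict,
-- so an association list with duplicate keys does not represent any Python input.
def Pre_blank_rectangular_prism (state : List (Int × List (Int × List (Int × String)))) : Prop :=
  (state.map Prod.fst).Nodup ∧
  ∀ p ∈ state, (p.2.map Prod.fst).Nodup ∧ ∀ q ∈ p.2, (q.2.map Prod.fst).Nodup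
instance (state : List (Int × List (Int × List (Int × String)))) : Decidable (Pre_blank_rectangular_prism state) := by unfold Pre_blank_rectangular_prism; infer_instance

def pvWitness_blank_rectangular_prism : (List (Int × List (Int × List (Int × String)))) :=
  [(0, [(1, [(2, "#"), (3, ".")]), (4, [])]), (5, [])]

def Spec_blank_rectangular_prism (state : List (Int × List (Int × List (Int × String)))) (out : List (Int × List (Int × List (Int × String)))) : Prop := out = blank_rectangular_prism_alt state
instance (state : List (Int × List (Int × List (Int × String)))) (out : List (Int × List (Int × List (Int × String)))) : Decidable (Spec_blank_rectangular_prism state out) := by unfold Spec_blank_rectangular_prism; infer_instance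

-- ===== CLAIM (what is proved, stated in full; the proofs are below) =====
def Claim_equal_blank_rectangular_prism : Prop := ∀ (state : List (Int × List (Int × List (Int × String)))), Dom_blank_rectangular_prism state → Pre_blank_rectangular_prism state → Spec_blank_rectangular_prism state (blank_rectangular_prism state)

-- ===== LEMMAS AND PROOFS =====

-- One level of A's loop: iterating the keys of a nodup-keyed dict and inserting
-- f(value) under each key appends the pairs in order, i.e. it is a map over the items.
theorem pv_loop_eq {α β : Type} (l : List (Int × α)) (f : α → β) (dflt : α)
    (h : (l.map Prod.fst).Nodup) :
    ((PySem.Dict.mk l).keys.foldl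
        (fun b k => b.insert k (f ((PySem.Dict.mk l).getD k dflt)))
        (PySem.Dict.empty : PySem.Dict Int β)).items
      = l.map (fun p => (p.1, f p.2)) := by
  have hkeys : (PySem.Dict.mk l).keys = l.map Prod.fst := by
    simp [PySem.Dict.keys_mk]
  rw [hkeys, List.foldl_map]
  have hfresh : ∀ a ∈ l, (PySem.Dict.empty : PySem.Dict Int β).contains a.1 = false := by
    intro a _; simp [PySem.Dict.contains_empty]
  have := PySem.Dict.items_foldl_insert_fresh (l := l) (k := Prod.fst)
      (v := fun p => f ((PySem.Dict.mk l).getD p.1 dflt))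
      (d := (PySem.Dict.empty : PySem.Dict Int β)) hfresh h
  rw [this]
  simp only [show (PySem.Dict.empty : PySem.Dict Int β).items = [] from rfl, List.nil_append]
  apply List.map_congr_left
  intro p hp
  have hget : (PySem.Dict.mk l).getD p.1 dflt = p.2 := by
    apply PySem.Dict.getD_of_mem_items
    · simpa [PySem.Dict.items] using hp
    · simpa [PySem.Dict.keys_mk] using h
  rw [hget]

theorem blank_eq (state : List (Int × List (Int × List (Int × String))))
    (hpre : Pre_blank_rectangular_prism state) :
    blank_rectangular_prism state = blank_rectangular_prism_alt state := by
  obtain ⟨h1, h2⟩ := hpre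
  unfold blank_rectangular_prism blank_rectangular_prism_alt
  rw [pv_loop_eq state
    (fun v => ((PySem.Dict.mk v).keys.foldl
      (fun b2 y =>
        b2.insert y (((PySem.Dict.mk ((PySem.Dict.mk v).getD y [])).keys.foldl
          (fun b3 x => b3.insert x ".") PySem.Dict.empty).items))
      PySem.Dict.empty).items) [] h1]
  apply List.map_congr_left
  intro p hp
  obtain ⟨hp1, hp2⟩ := h2 p hp
  simp only [Prod.mk.injEq, true_and]
  rw [pv_loop_eq p.2
    (fun w => ((PySem.Dict.mk w).keys.foldl (fun b3 x => b3.insert x ".") PySem.Dict.empty).items)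
    [] hp1]
  unfold pvBuild2
  apply List.map_congr_left
  intro q hq
  have hq2 := hp2 q hq
  simp only [Prod.mk.injEq, true_and]
  rw [pv_loop_eq q.2 (fun _ => ".") "" hq2]
  unfold pvBuild1
  rfl

-- ===== VERDICT (by name: the statement is the Claim_ definition above) =====
theorem blank_rectangular_prism_spec : Claim_equal_blank_rectangular_prism := by
  intro state _ hpre
  unfold Spec_blank_rectangular_prism
  exact blank_eq state hpre
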